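-- pv_equiv track=rewrite | github.com/naye0ng/Algorithm | OnlineCodingTest/HyundaiCard/부정행위.py | solution
-- ===== SOURCE A (Python) =====
-- def solution(ip_addrs, langs, scores):
--     N = len(ip_addrs)
--
--     same_ip = dict()
--     for i in range(N) :
--         if ip_addrs[i] not in same_ip :
--             same_ip[ip_addrs[i]] = []
--         same_ip[ip_addrs[i]].append(i)
--         # 언어도 변경
--         if langs[i] == "C++" or langs[i] == "C#" :
--             langs[i] = "C"
--
--     answer = N
--     for ip in same_ip.keys() :
--         if len(same_ip[ip]) >= 4 :
--             answer -= len(same_ip[ip])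
--         elif len(same_ip[ip]) == 3 :
--             if langs[same_ip[ip][0]] == langs[same_ip[ip][1]] and langs[same_ip[ip][1]] == langs[same_ip[ip][2]] :
--                 answer -= 3
--         elif len(same_ip[ip]) == 2 :
--             if langs[same_ip[ip][0]] == langs[same_ip[ip][1]] and scores[same_ip[ip][0]] == scores[same_ip[ip][1]] :
--                 answer -= 2
--     return answer
-- ===== SOURCE B (Python) =====
-- def solution(ip_addrs, langs, scores):
--     n = len(ip_addrs)
--     # normalize languages in place (same observable mutation as the original)
--     langs[:n] = ['C' if l in ('C++', 'C#') else l for l in langs[:n]]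
--     answer = n
--     seen = []
--     for ip in ip_addrs:
--         if ip not in seen:
--             seen.append(ip)
--             group = [j for j, a in enumerate(ip_addrs) if a == ip]
--             k = len(group)
--             if (k >= 4
--                     or (k == 3 and len({langs[j] for j in group}) == 1)
--                     or (k == 2 and (langs[group[0]], scores[group[0]])
--                                 == (langs[group[1]], scores[group[1]]))):
--                 answer -= k
--     return answer
-- ===== Notes on version B (the rewrite author's own statement) =====
-- stated objective: alternative
-- what changed: B drops A's dict-of-lists and per-size branch ladder: it normalizes langs by one slice assignment, scans ip values with a seen-list, recomputes each group from enumerate(), and subtracts len(group) under a single or-combined cheating predicate (set-of-langs size for triples, tuple comparison for pairs).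
-- outside the precondition, e.g. on solution(['a', 'a', 'a'], ['C', 'C', 'C'], []): A returns 0, B returns 0; on solution(['x', 'y', 'y'], ['C', 'C', 'Java'], []): A returns 3, B raises IndexError
import Mathlib
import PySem

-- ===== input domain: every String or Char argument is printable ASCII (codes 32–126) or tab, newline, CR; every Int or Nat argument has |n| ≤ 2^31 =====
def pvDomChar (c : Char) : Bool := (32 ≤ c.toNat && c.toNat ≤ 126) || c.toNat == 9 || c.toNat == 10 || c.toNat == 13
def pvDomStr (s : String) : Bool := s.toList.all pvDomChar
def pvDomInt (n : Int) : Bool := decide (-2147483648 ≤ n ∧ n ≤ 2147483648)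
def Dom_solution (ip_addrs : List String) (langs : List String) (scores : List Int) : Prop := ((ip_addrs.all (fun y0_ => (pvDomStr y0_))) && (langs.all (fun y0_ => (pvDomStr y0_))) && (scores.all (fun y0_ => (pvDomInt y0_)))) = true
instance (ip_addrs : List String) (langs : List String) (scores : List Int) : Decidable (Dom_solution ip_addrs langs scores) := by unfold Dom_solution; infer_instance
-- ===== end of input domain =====

-- B replaces A's dict-of-lists grouping by a seen-list scan over ip values that recomputes
-- each group from enumerate(), and replaces the per-size branch ladder by a single
-- or-combined cheating predicate (alternative decomposition, not faster). Both Pythons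
-- mutate `langs` identically (C++/C# -> C on the first N entries); the equivalence proved
-- here is about the return value.


-- ===== PORT A =====
def solution (ip_addrs : List String) (langs : List String) (scores : List Int) : Int :=
  let N := ip_addrs.length
  -- first loop: build same_ip (dict ip -> list of indices) and mutate langs (C++/C# -> C)
  let st := (List.range N).foldl
    (fun (st : PySem.Dict String (List Nat) × List String) i =>
      let d := st.1
      let lg := st.2
      let ip := ip_addrs.getD i ""
      let d := if d.contains ip then d else d.insert ip []        -- if ip not in same_ip: same_ip[ip] = []
      let d := d.modify ip [] (· ++ [i])                          -- same_ip[ip].append(i)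
      let lg := if lg.getD i "" == "C++" || lg.getD i "" == "C#" then lg.set i "C" else lg
      (d, lg)) (PySem.Dict.empty, langs)
  let d := st.1
  let lg := st.2
  -- second loop: over the dict keys in insertion order
  d.keys.foldl
    (fun (answer : Int) ip =>
      let g := d.getD ip []
      if g.length ≥ 4 then answer - g.length
      else if g.length = 3 then
        if lg.getD (g.getD 0 0) "" == lg.getD (g.getD 1 0) "" && lg.getD (g.getD 1 0) "" == lg.getD (g.getD 2 0) "" then
          answer - 3
        else answer
      else if g.length = 2 then
        if lg.getD (g.getD 0 0) "" == lg.getD (g.getD 1 0) "" && scores.getD (g.getD 0 0) 0 == scores.getD (g.getD 1 0) 0 then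
          answer - 2
        else answer
      else answer) (N : Int)

-- ===== PORT B =====
def solution_alt (ip_addrs : List String) (langs : List String) (scores : List Int) : Int :=
  let n := ip_addrs.length
  -- slice assignment langs[:n] = ['C' if l in ('C++','C#') else l for l in langs[:n]] (exact: 0 ≤ n)
  let lg := (langs.take n).map (fun l => if l == "C++" || l == "C#" then "C" else l) ++ langs.drop n
  -- for ip in ip_addrs: skip if already seen, else append to seen, recompute the group, test the
  -- single or-combined cheating predicate and subtract the group size
  (ip_addrs.foldl
    (fun (st : Int × List String) ip =>
      if st.2.contains ip then st
      else
        let g := ((PySem.List.enumerate ip_addrs).filter (fun p => p.2 == ip)).map Prod.fst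
        let k := g.length
        (if decide (4 ≤ k)
            || (k == 3 && PySem.Set.len (PySem.Set.ofList (g.map (fun j => PySem.List.pyGetD lg j ""))) == 1)
            || (k == 2 && ((PySem.List.pyGetD lg (g.getD 0 0) "", PySem.List.pyGetD scores (g.getD 0 0) 0)
                            == (PySem.List.pyGetD lg (g.getD 1 0) "", PySem.List.pyGetD scores (g.getD 1 0) 0)))
         then st.1 - k else st.1, st.2 ++ [ip]))
    ((n : Int), [])).1

-- ===== PRECONDITION & SPEC =====
-- Pre_ excludes inputs where langs or scores is shorter than ip_addrs: there the Python A
-- (and B) raises IndexError — except on some inputs where a too-short `scores` is never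
-- consulted (no cheating pair), on which A and B both still return the same value; that
-- slight narrowing keeps Pre_ closed-form instead of re-simulating the grouping.
def Pre_solution (ip_addrs : List String) (langs : List String) (scores : List Int) : Prop :=
  ip_addrs.length ≤ langs.length ∧ ip_addrs.length ≤ scores.length
instance (ip_addrs : List String) (langs : List String) (scores : List Int) : Decidable (Pre_solution ip_addrs langs scores) := by unfold Pre_solution; infer_instance

def pvWitness_solution : List String × List String × List Int :=
  (["1.1.1.1", "2.2.2.2", "1.1.1.1"], ["C++", "Java", "C"], [10, 20, 10])

def Spec_solution (ip_addrs : List String) (langs : List String) (scores : List Int) (out : Int) : Prop := out = solution_alt ip_addrs langs scores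
instance (ip_addrs : List String) (langs : List String) (scores : List Int) (out : Int) : Decidable (Spec_solution ip_addrs langs scores out) := by unfold Spec_solution; infer_instance

-- ===== CLAIM (what is proved, stated in full; the proofs are below) =====
def Claim_equal_solution : Prop := ∀ (ip_addrs : List String) (langs : List String) (scores : List Int), Dom_solution ip_addrs langs scores → Pre_solution ip_addrs langs scores → Spec_solution ip_addrs langs scores (solution ip_addrs langs scores)

-- ===== LEMMAS AND PROOFS =====

theorem pv_dict_step (d : PySem.Dict String (List Nat)) (ip : String) (i : Nat) :
    ((if d.contains ip then d else d.insert ip []).modify ip [] (· ++ [i])) = d.modify ip [] (· ++ [i]) := by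
  by_cases h : d.contains ip
  · rw [if_pos h]
  · rw [if_neg h]
    simp only [PySem.Dict.modify, PySem.Dict.getD_insert_self, PySem.Dict.insert_insert_self,
      PySem.Dict.getD_of_not_contains d [] (by simpa using h)]

-- the list A's dict keys enumerate is ip_addrs itself (map of positional reads)
theorem pv_map_getD (l : List String) :
    (List.range l.length).map (fun i => l.getD i "") = l := by
  apply List.ext_getElem
  · simp
  · intro i h1 h2
    simp [List.getElem?_eq_getElem h2]

-- A's in-place element-by-element normalization equals B's slice assignment
theorem pv_norm (langs : List String) (n : Nat) (h : n ≤ langs.length) :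
    (List.range n).foldl
      (fun (lg : List String) i =>
        if lg.getD i "" == "C++" || lg.getD i "" == "C#" then lg.set i "C" else lg) langs
    = (langs.take n).map (fun l => if l == "C++" || l == "C#" then "C" else l) ++ langs.drop n := by
  induction n with
  | zero => simp
  | succ n ih =>
    have h' : n ≤ langs.length := Nat.le_of_succ_le h
    have hn : n < langs.length := h
    rw [List.range_succ, List.foldl_append, ih h']
    simp only [List.foldl_cons, List.foldl_nil]
    have hlen : ((langs.take n).map (fun l => if l == "C++" || l == "C#" then "C" else l)).length = n := by
      simp [List.length_take, Nat.min_eq_left h']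
    have hdrop : langs.drop n = langs[n] :: langs.drop (n + 1) := by
      rw [List.drop_eq_getElem_cons hn]
    have hget : ((langs.take n).map (fun l => if l == "C++" || l == "C#" then "C" else l) ++ langs.drop n).getD n "" = langs[n] := by
      rw [hdrop, List.getD_eq_getElem?_getD, List.getElem?_append_right (by omega), hlen]
      simp [List.getElem?_eq_getElem hn]
    rw [hget]
    have htake : (langs.take (n+1)).map (fun l => if l == "C++" || l == "C#" then "C" else l)
        = (langs.take n).map (fun l => if l == "C++" || l == "C#" then "C" else l)
          ++ [if langs[n] == "C++" || langs[n] == "C#" then "C" else langs[n]] := by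
      rw [List.take_add_one, List.getElem?_eq_getElem hn]
      simp only [Option.toList_some, List.map_append, List.map_cons, List.map_nil]
    by_cases hc : langs[n] == "C++" || langs[n] == "C#"
    · rw [if_pos hc, htake, if_pos hc, hdrop]
      rw [List.set_append_right _ _ (by omega), hlen, Nat.sub_self]
      simp
      rw [hdrop]
      rfl
    · rw [if_neg hc, htake, if_neg hc, hdrop]
      simp

-- B's group (first components of the filtered enumeration) is A's group, cast to Int
theorem pv_group (xs : List String) (s : Int) (ip : String) :
    ((PySem.List.enumerate xs s).filter (fun p => p.2 == ip)).map Prod.fst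
    = ((List.range xs.length).filter (fun i => xs.getD i "" == ip)).map (fun i : Nat => s + (i : Int)) := by
  induction xs generalizing s with
  | nil => simp [PySem.List.enumerate]
  | cons x l ih =>
    rw [PySem.List.enumerate_cons]
    rw [List.length_cons, List.range_succ_eq_map]
    simp only [List.filter_cons, List.filter_map, Function.comp_def, Nat.succ_eq_add_one,
      List.getD_cons_succ]
    by_cases hx : x == ip
    · rw [if_pos (by simpa using hx), if_pos (by simpa using hx)]
      simp only [List.map_cons, List.map_map, Function.comp_def]
      refine List.cons_eq_cons.mpr ⟨by simp, ?_⟩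
      rw [ih (s + 1)]
      apply List.map_congr_left
      intro i _
      simp only [Nat.succ_eq_add_one]
      push_cast; ring
    · rw [if_neg (by simpa using hx), if_neg (by simpa using hx)]
      rw [ih (s + 1), List.map_map]
      apply List.map_congr_left
      intro i _
      simp only [Function.comp_apply, Nat.succ_eq_add_one]
      push_cast; ring

theorem pv_group0 (xs : List String) (ip : String) :
    ((PySem.List.enumerate xs).filter (fun p => p.2 == ip)).map Prod.fst
    = ((List.range xs.length).filter (fun i => xs.getD i "" == ip)).map (fun i : Nat => (i : Int)) := by
  rw [pv_group xs 0 ip]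
  apply List.map_congr_left
  intro i _
  simp

-- the seen-list loop processes exactly the fresh elements, in order
def pvNew (s : List String) : List String → List String
  | [] => []
  | x :: l => if s.contains x then pvNew s l else x :: pvNew (s ++ [x]) l

theorem pv_seen (f : Int → String → Int) (l : List String) (a : Int) (s : List String) :
    (l.foldl (fun st ip => if st.2.contains ip then st else (f st.1 ip, st.2 ++ [ip])) (a, s)).1
    = List.foldl f a (pvNew s l) := by
  induction l generalizing a s with
  | nil => rfl
  | cons x l ih =>
    simp only [List.foldl_cons, pvNew]
    by_cases hc : s.contains x
    · rw [if_pos hc, if_pos hc]; exact ih a s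
    · rw [if_neg hc, if_neg hc]; exact ih (f a x) (s ++ [x])

theorem pv_new_update (l : List String) (s : List String) :
    PySem.Set.update s l = s ++ pvNew s l := by
  induction l generalizing s with
  | nil => simp [PySem.Set.update, pvNew]
  | cons x l ih =>
    simp only [PySem.Set.update, List.foldl_cons, pvNew] at *
    by_cases hm : x ∈ s
    · rw [PySem.Set.add_of_mem hm, if_pos (by simpa using hm)]
      exact ih s
    · rw [PySem.Set.add_of_not_mem hm, if_neg (by simpa using hm), ih (s ++ [x])]
      simp

theorem pv_new_ofList (l : List String) : pvNew [] l = PySem.Set.ofList l := by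
  have := pv_new_update l []
  simpa [PySem.Set.update_nil_left] using this.symm

theorem pv_three (x y z : String) :
    (PySem.Set.len (PySem.Set.ofList [x, y, z]) == 1) = (x == y && y == z) := by
  by_cases h1 : x = y
  · subst h1
    by_cases h2 : x = z
    · subst h2; simp [PySem.Set.ofList, PySem.Set.add, PySem.Set.len]
    · simp [PySem.Set.ofList, PySem.Set.add, PySem.Set.len, h2, Ne.symm h2]
  · by_cases h2 : y = z
    · subst h2
      simp [PySem.Set.ofList, PySem.Set.add, PySem.Set.len, h1, Ne.symm h1]
    · by_cases h3 : x = z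
      · subst h3
        simp [PySem.Set.ofList, PySem.Set.add, PySem.Set.len, h1, h2]
      · simp [PySem.Set.ofList, PySem.Set.add, PySem.Set.len, h1, h2, Ne.symm h1, Ne.symm h2, Ne.symm h3]

theorem pv_step (lg : List String) (scores : List Int) (G : List Nat) (ans : Int) :
    (if G.length ≥ 4 then ans - G.length
     else if G.length = 3 then
       if lg.getD (G.getD 0 0) "" == lg.getD (G.getD 1 0) "" && lg.getD (G.getD 1 0) "" == lg.getD (G.getD 2 0) "" then
         ans - 3
       else ans
     else if G.length = 2 then
       if lg.getD (G.getD 0 0) "" == lg.getD (G.getD 1 0) "" && scores.getD (G.getD 0 0) 0 == scores.getD (G.getD 1 0) 0 then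
         ans - 2
       else ans
     else ans)
    =
    (let g := G.map (fun i : Nat => (i : Int))
     let k := g.length
     if decide (4 ≤ k)
        || (k == 3 && PySem.Set.len (PySem.Set.ofList (g.map (fun j => PySem.List.pyGetD lg j ""))) == 1)
        || (k == 2 && ((PySem.List.pyGetD lg (g.getD 0 0) "", PySem.List.pyGetD scores (g.getD 0 0) 0)
                        == (PySem.List.pyGetD lg (g.getD 1 0) "", PySem.List.pyGetD scores (g.getD 1 0) 0)))
     then ans - k else ans) := by
  match G with
  | [] => simp
  | [a] => simp
  | [a, b] =>
    simp only [List.length_cons, List.length_nil, List.map_cons, List.map_nil,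
      PySem.List.pyGetD_natCast]
    norm_num
  | [a, b, c] =>
    simp only [List.length_cons, List.length_nil, List.map_cons, List.map_nil,
      PySem.List.pyGetD_natCast, pv_three]
    norm_num
  | a :: b :: c :: d :: l =>
    simp

-- B's per-ip loop body (proof-only name for the lambda in solution_alt)
def pvBF (ips : List String) (langs : List String) (scores : List Int) : Int → String → Int :=
  fun a ip =>
    let g := ((PySem.List.enumerate ips).filter (fun p => p.2 == ip)).map Prod.fst
    let k := g.length
    let lg := (langs.take ips.length).map (fun l => if l == "C++" || l == "C#" then "C" else l) ++ langs.drop ips.length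
    if decide (4 ≤ k)
        || (k == 3 && PySem.Set.len (PySem.Set.ofList (g.map (fun j => PySem.List.pyGetD lg j ""))) == 1)
        || (k == 2 && ((PySem.List.pyGetD lg (g.getD 0 0) "", PySem.List.pyGetD scores (g.getD 0 0) 0)
                        == (PySem.List.pyGetD lg (g.getD 1 0) "", PySem.List.pyGetD scores (g.getD 1 0) 0)))
    then a - k else a

theorem pv_main (ips : List String) (langs : List String) (scores : List Int)
    (h : ips.length ≤ langs.length) :
    solution ips langs scores = solution_alt ips langs scores := by
  have hB : solution_alt ips langs scores
      = List.foldl (pvBF ips langs scores) (↑ips.length) (pvNew [] ips) :=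
    pv_seen (pvBF ips langs scores) ips (↑ips.length) []
  rw [hB, pv_new_ofList]
  unfold solution
  dsimp only []
  rw [PySem.List.foldl_prod_mk
    (f := fun (d : PySem.Dict String (List Nat)) (i : Nat) =>
      (if d.contains (ips.getD i "") then d else d.insert (ips.getD i "") []).modify (ips.getD i "") [] (· ++ [i]))
    (g := fun (lg : List String) (i : Nat) =>
      if lg.getD i "" == "C++" || lg.getD i "" == "C#" then lg.set i "C" else lg)]
  dsimp only []
  rw [PySem.List.foldl_congr_mem (l := List.range ips.length)
    (f := fun (d : PySem.Dict String (List Nat)) (i : Nat) =>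
      (if d.contains (ips.getD i "") then d else d.insert (ips.getD i "") []).modify (ips.getD i "") [] (· ++ [i]))
    (g := fun (d : PySem.Dict String (List Nat)) (i : Nat) => d.modify (ips.getD i "") [] (· ++ [i]))
    PySem.Dict.empty (fun acc x _ => pv_dict_step acc (ips.getD x "") x)]
  rw [PySem.Dict.keys_foldl_modify_key (List.range ips.length) (fun i => ips.getD i "") []
    (fun _ i => (· ++ [i])) PySem.Dict.empty]
  rw [PySem.Dict.keys_empty, PySem.Set.update_nil_left]
  have hD : ∀ ip : String,
      (List.foldl (fun (d : PySem.Dict String (List Nat)) (i : Nat) => d.modify (ips.getD i "") [] (· ++ [i]))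
        PySem.Dict.empty (List.range ips.length)).getD ip []
      = List.filter (fun i => ips.getD i "" == ip) (List.range ips.length) := by
    intro ip
    rw [← List.foldl_map (f := fun i : Nat => (ips.getD i "", i))
      (g := fun (d : PySem.Dict String (List Nat)) (p : String × Nat) => d.modify p.1 [] (· ++ [p.2]))]
    rw [PySem.Dict.getD_foldl_modify_append]
    simp [List.filter_map, Function.comp_def, List.map_map]
  simp only [hD]
  rw [pv_norm langs ips.length h]
  rw [pv_map_getD ips]
  apply PySem.List.foldl_congr_mem
  intro a ip _
  simp only [pvBF]
  rw [pv_group0 ips ip]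
  exact pv_step _ scores _ a

-- ===== VERDICT (by name: the statement is the Claim_ definition above) =====
theorem solution_spec : Claim_equal_solution := by
  intro ip_addrs langs scores _ hpre
  exact pv_main ip_addrs langs scores hpre.1
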